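-- pv_equiv track=rewrite | github.com/blues-lead/python_prog | kierros6/Project_bar_diagram.py | form_data
-- ===== SOURCE A (Python) =====
-- def form_data(ranges,marks):
--     """
--     Function produces list in form [index, count of marks].
--     for instance [0,4] meaning that there are 4 zero-marks,
--     [1,2] two marks 1
--     :param ranges: list of pel spacings (result of function get_ranges)
--     :param marks: list of each students points
--     :return: list of marks and counts of the marks
--     """
--     data = [0]*len(ranges)
--     z = 0 # counter for ranges list
--     j = 0 # counter for marks in each range
--     for rng in ranges:
--         for m in marks:
--             if m >= z and m <= rng:
--                 data[j] += 1
--         z = rng + 1 # go to next range value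
--         j += 1
--     return data
-- ===== SOURCE B (Python) =====
-- import bisect
--
-- def form_data(ranges, marks):
--     s = sorted(marks)
--     data = []
--     lower = 0
--     for rng in ranges:
--         if lower <= rng:
--             data.append(bisect.bisect_right(s, rng) - bisect.bisect_left(s, lower))
--         else:
--             data.append(0)
--         lower = rng + 1
--     return data
-- ===== Notes on version B (the rewrite author's own statement) =====
-- stated objective: faster
-- what changed: Replaced A's inner scan of all marks for every bucket by sorting the marks once and counting each bucket [lower, rng] with two binary searches (bisect_right - bisect_left, 0 when the bucket is empty).
import Mathlib
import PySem

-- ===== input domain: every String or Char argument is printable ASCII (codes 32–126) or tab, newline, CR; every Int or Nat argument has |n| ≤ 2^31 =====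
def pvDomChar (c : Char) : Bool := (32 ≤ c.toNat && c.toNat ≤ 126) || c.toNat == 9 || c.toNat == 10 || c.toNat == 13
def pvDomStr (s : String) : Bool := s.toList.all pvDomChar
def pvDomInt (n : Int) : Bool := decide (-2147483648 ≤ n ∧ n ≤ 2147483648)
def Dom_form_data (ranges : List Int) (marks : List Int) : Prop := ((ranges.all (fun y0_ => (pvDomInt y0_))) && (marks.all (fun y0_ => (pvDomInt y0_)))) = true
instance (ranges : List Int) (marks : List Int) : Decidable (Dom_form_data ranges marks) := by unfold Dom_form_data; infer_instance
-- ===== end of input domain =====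

-- B replaces A's inner scan of all marks per bucket by one sort of the marks plus a
-- binary-search (bisect) count per bucket: sort-then-bisect instead of nested loops.

-- ===== PORT A =====
-- literal transliteration of A: preallocated zero list, nested loops, data[j] += 1
def form_data (ranges : List Int) (marks : List Int) : List Int :=
  let data := List.replicate ranges.length (0 : Int)
  (ranges.foldl (fun (st : List Int × Int × Nat) rng =>
      (marks.foldl (fun d m =>
          if st.2.1 ≤ m ∧ m ≤ rng then d.set st.2.2 (d.getD st.2.2 0 + 1) else d) st.1,
       rng + 1, st.2.2 + 1)) (data, 0, 0)).1

-- ===== PORT B =====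
-- literal transliteration of Source B; sorted → PySem.List.sorted, bisect.bisect_left/right
-- (stdlib calls) → PySem.List.bisectLeft/bisectRight
def form_data_alt (ranges : List Int) (marks : List Int) : List Int :=
  let s := PySem.List.sorted marks (fun x => x) false
  (ranges.foldl (fun (st : List Int × Int) rng =>
      (st.1 ++ [if st.2 ≤ rng then
                  ((PySem.List.bisectRight s rng : Int) - (PySem.List.bisectLeft s st.2 : Int))
                else 0],
       rng + 1)) ([], 0)).1

-- ===== PRECONDITION & SPEC =====
def Spec_form_data (ranges : List Int) (marks : List Int) (out : List Int) : Prop := out = form_data_alt ranges marks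
instance (ranges : List Int) (marks : List Int) (out : List Int) : Decidable (Spec_form_data ranges marks out) := by unfold Spec_form_data; infer_instance

-- ===== CLAIM (what is proved, stated in full; the proofs are below) =====
def Claim_equal_form_data : Prop := ∀ (ranges : List Int) (marks : List Int), Dom_form_data ranges marks → Spec_form_data ranges marks (form_data ranges marks)

-- ===== LEMMAS AND PROOFS =====

-- the reference value: one count per bucket, lower bound carried along
def pvBuckets (marks : List Int) : List Int → Int → List Int
  | [], _ => []
  | rng :: rs, z =>
      (marks.countP (fun m => decide (z ≤ m ∧ m ≤ rng)) : Int) :: pvBuckets marks rs (rng + 1)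

lemma pv_getD_set_self (d : List Int) (j : Nat) (v : Int) (h : j < d.length) :
    (d.set j v).getD j 0 = v := by
  simp [List.getD_eq_getElem?_getD, h]

-- A's inner loop adds the bucket count to slot j
lemma pv_inner (marks : List Int) (z rng : Int) (j : Nat) (d : List Int) :
    marks.foldl (fun d m => if z ≤ m ∧ m ≤ rng then d.set j (d.getD j 0 + 1) else d) d
      = d.set j (d.getD j 0 + (marks.countP (fun m => decide (z ≤ m ∧ m ≤ rng)) : Int)) := by
  induction marks generalizing d with
  | nil =>
      simp only [List.foldl_nil, List.countP_nil, Int.natCast_zero, add_zero]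
      by_cases h : j < d.length
      · simp [List.getD_eq_getElem?_getD, List.getElem?_eq_getElem h, List.set_getElem_self]
      · rw [List.set_eq_of_length_le (le_of_not_gt h)]
  | cons m ms ih =>
      simp only [List.foldl_cons, List.countP_cons]
      by_cases hP : z ≤ m ∧ m ≤ rng
      · rw [if_pos hP, ih]
        by_cases h : j < d.length
        · rw [pv_getD_set_self d j _ h, List.set_set]
          have : decide (z ≤ m ∧ m ≤ rng) = true := by simp [hP.1, hP.2]
          rw [this]
          simp only [if_true]
          congr 1
          push_cast
          omega
        · rw [List.set_eq_of_length_le (le_of_not_gt h),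
              List.set_eq_of_length_le (le_of_not_gt h),
              List.set_eq_of_length_le (le_of_not_gt h)]
      · rw [if_neg hP, ih]
        have : decide (z ≤ m ∧ m ≤ rng) = false := by simpa using hP
        rw [this]
        simp

-- A's outer loop: invariant over processed prefix
lemma pv_foldA (marks : List Int) (rs : List Int) (pref : List Int) (z : Int) :
    (rs.foldl (fun (st : List Int × Int × Nat) rng =>
        (marks.foldl (fun d m =>
            if st.2.1 ≤ m ∧ m ≤ rng then d.set st.2.2 (d.getD st.2.2 0 + 1) else d) st.1,
         rng + 1, st.2.2 + 1)) (pref ++ List.replicate rs.length 0, z, pref.length)).1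
      = pref ++ pvBuckets marks rs z := by
  induction rs generalizing pref z with
  | nil => simp [pvBuckets]
  | cons rng rs ih =>
      simp only [List.foldl_cons, List.length_cons, List.replicate_succ, pvBuckets]
      rw [pv_inner]
      have hget : (pref ++ (0 : Int) :: List.replicate rs.length 0).getD pref.length 0 = 0 := by
        simp [List.getD_eq_getElem?_getD]
      have hset : (pref ++ (0 : Int) :: List.replicate rs.length 0).set pref.length
            (0 + (marks.countP (fun m => decide (z ≤ m ∧ m ≤ rng)) : Int))
          = (pref ++ [(marks.countP (fun m => decide (z ≤ m ∧ m ≤ rng)) : Int)])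
              ++ List.replicate rs.length 0 := by
        rw [List.set_append_right _ _ (le_refl pref.length)]
        simp
      rw [hget, hset]
      have := ih (pref ++ [(marks.countP (fun m => decide (z ≤ m ∧ m ≤ rng)) : Int)]) (rng + 1)
      simp only [List.length_append, List.length_cons, List.length_nil, Nat.zero_add] at this ⊢
      rw [this]
      simp

-- B's loop: invariant over accumulated output
lemma pv_foldB (s : List Int) (rs : List Int) (out : List Int) (lower : Int) :
    (rs.foldl (fun (st : List Int × Int) rng =>
        (st.1 ++ [if st.2 ≤ rng then
                    ((PySem.List.bisectRight s rng : Int) - (PySem.List.bisectLeft s st.2 : Int))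
                  else 0],
         rng + 1)) (out, lower)).1
      = out ++ (rs.foldl (fun (st : List Int × Int) rng =>
          (st.1 ++ [if st.2 ≤ rng then
                      ((PySem.List.bisectRight s rng : Int) - (PySem.List.bisectLeft s st.2 : Int))
                    else 0],
           rng + 1)) ([], lower)).1 := by
  induction rs generalizing out lower with
  | nil => simp
  | cons rng rs ih =>
      simp only [List.foldl_cons]
      rw [ih, ih ([] ++ _)]
      simp

-- bisectLeft on a sorted list counts the elements < x
lemma pv_bisectLeft_eq_countP (s : List Int) (x : Int) (hs : s.Pairwise (· ≤ ·)) :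
    PySem.List.bisectLeft s x = s.countP (fun m => decide (m < x)) := by
  obtain ⟨hle, hlt, hge⟩ := PySem.List.bisectLeft_spec s x hs
  set k := PySem.List.bisectLeft s x with hk
  have hsplit : s = s.take k ++ s.drop k := (List.take_append_drop k s).symm
  have h1 : (s.take k).countP (fun m => decide (m < x)) = (s.take k).length := by
    rw [List.countP_eq_length]
    intro a ha
    obtain ⟨i, hi, rfl⟩ := List.mem_iff_getElem.mp ha
    have hik : i < k := lt_of_lt_of_le hi (by simp [List.length_take])
    have his : i < s.length := lt_of_lt_of_le hik hle
    rw [List.getElem_take]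
    simpa using hlt i his hik
  have h2 : (s.drop k).countP (fun m => decide (m < x)) = 0 := by
    rw [List.countP_eq_zero]
    intro a ha
    obtain ⟨i, hi, rfl⟩ := List.mem_iff_getElem.mp ha
    have his : k + i < s.length := by
      have := hi; simp [List.length_drop] at this; omega
    rw [List.getElem_drop]
    have := hge (k + i) his (Nat.le_add_right k i)
    simpa using not_lt.mpr this
  conv_rhs => rw [hsplit]
  rw [List.countP_append, h1, h2, List.length_take]
  omega

-- bisectRight on a sorted list counts the elements ≤ x
lemma pv_bisectRight_eq_countP (s : List Int) (x : Int) (hs : s.Pairwise (· ≤ ·)) :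
    PySem.List.bisectRight s x = s.countP (fun m => decide (m ≤ x)) := by
  obtain ⟨hle, hlt, hge⟩ := PySem.List.bisectRight_spec s x hs
  set k := PySem.List.bisectRight s x with hk
  have hsplit : s = s.take k ++ s.drop k := (List.take_append_drop k s).symm
  have h1 : (s.take k).countP (fun m => decide (m ≤ x)) = (s.take k).length := by
    rw [List.countP_eq_length]
    intro a ha
    obtain ⟨i, hi, rfl⟩ := List.mem_iff_getElem.mp ha
    have hik : i < k := lt_of_lt_of_le hi (by simp [List.length_take])
    have his : i < s.length := lt_of_lt_of_le hik hle
    rw [List.getElem_take]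
    simpa using hlt i his hik
  have h2 : (s.drop k).countP (fun m => decide (m ≤ x)) = 0 := by
    rw [List.countP_eq_zero]
    intro a ha
    obtain ⟨i, hi, rfl⟩ := List.mem_iff_getElem.mp ha
    have his : k + i < s.length := by
      have := hi; simp [List.length_drop] at this; omega
    rw [List.getElem_drop]
    have := hge (k + i) his (Nat.le_add_right k i)
    simpa using not_le.mpr this
  conv_rhs => rw [hsplit]
  rw [List.countP_append, h1, h2, List.length_take]
  omega

-- counting split: #(≤ u) = #(< z) + #(z ≤ · ≤ u) whenever z ≤ u
lemma pv_countP_split (s : List Int) (z u : Int) (h : z ≤ u) :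
    s.countP (fun m => decide (m ≤ u))
      = s.countP (fun m => decide (m < z)) + s.countP (fun m => decide (z ≤ m ∧ m ≤ u)) := by
  induction s with
  | nil => simp
  | cons a s ih =>
      simp only [List.countP_cons, ih]
      split_ifs <;> simp_all <;> omega

-- one bucket entry of B equals the bucket count over marks
lemma pv_entry (marks : List Int) (z rng : Int) :
    (if z ≤ rng then
        ((PySem.List.bisectRight (PySem.List.sorted marks (fun x => x) false) rng : Int)
          - (PySem.List.bisectLeft (PySem.List.sorted marks (fun x => x) false) z : Int))
      else 0)
      = (marks.countP (fun m => decide (z ≤ m ∧ m ≤ rng)) : Int) := by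
  set s := PySem.List.sorted marks (fun x => x) false with hsdef
  have hperm : s.Perm marks := PySem.List.sorted_perm marks (fun x => x) false
  have hcnt : marks.countP (fun m => decide (z ≤ m ∧ m ≤ rng))
      = s.countP (fun m => decide (z ≤ m ∧ m ≤ rng)) := (hperm.countP_eq _).symm
  by_cases h : z ≤ rng
  · rw [if_pos h, hcnt]
    have hs : s.Pairwise (· ≤ ·) := by
      have := PySem.List.sorted_pairwise (xs := marks) (key := fun x => x)
      simpa [hsdef] using this
    rw [pv_bisectLeft_eq_countP s z hs, pv_bisectRight_eq_countP s rng hs,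
        pv_countP_split s z rng h]
    push_cast
    ring
  · rw [if_neg h, hcnt]
    have : s.countP (fun m => decide (z ≤ m ∧ m ≤ rng)) = 0 := by
      rw [List.countP_eq_zero]
      intro a _
      simp only [decide_eq_true_eq, not_and]
      intro h1 h2
      omega
    rw [this]
    simp

-- B's loop produces exactly the bucket counts
lemma pv_foldB_buckets (marks : List Int) (rs : List Int) (lower : Int) :
    (rs.foldl (fun (st : List Int × Int) rng =>
        (st.1 ++ [if st.2 ≤ rng then
                    ((PySem.List.bisectRight (PySem.List.sorted marks (fun x => x) false) rng : Int)
                      - (PySem.List.bisectLeft (PySem.List.sorted marks (fun x => x) false) st.2 : Int))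
                  else 0],
         rng + 1)) ([], lower)).1
      = pvBuckets marks rs lower := by
  induction rs generalizing lower with
  | nil => simp [pvBuckets]
  | cons rng rs ih =>
      simp only [List.foldl_cons, pvBuckets]
      rw [pv_foldB, ih (rng + 1)]
      simp [pv_entry marks lower rng]

-- ===== VERDICT (by name: the statement is the Claim_ definition above) =====
theorem form_data_spec : Claim_equal_form_data := by
  intro ranges marks _
  unfold Spec_form_data form_data form_data_alt
  have hA := pv_foldA marks ranges [] 0
  simp only [List.nil_append, List.length_nil] at hA
  rw [hA, pv_foldB_buckets marks ranges 0]
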